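-- pv_equiv track=rewrite | github.com/MagnusCardell/TweetClassifier | bayes_tweet.py | separateByClass
-- ===== SOURCE A (Python) =====
-- def separateByClass(tweets, baglist):
-- 	summary=0
-- 	num=0
-- 	wordlist = baglist.split(',')
-- 	for dataset in tweets:
-- 		vector = ();
-- 		for i in range(len(dataset)):
-- 			vector = vector + tuple(dataset[i].split())
-- 		for i in range(len(vector)):
-- 			if (vector[i].lower() in wordlist):
-- 				summary +=1
-- 			num+=1
-- 	return summary,num
-- ===== SOURCE B (Python) =====
-- def separateByClass(tweets, baglist):
--     # Build a histogram of lowercased tokens once, then one pass over distinct words.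
--     counter = {}
--     for dataset in tweets:
--         for chunk in dataset:
--             for w in chunk.split():
--                 lw = w.lower()
--                 counter[lw] = counter.get(lw, 0) + 1
--     wordset = set(baglist.split(','))
--     num = sum(counter.values())
--     summary = sum(c for w, c in counter.items() if w in wordset)
--     return summary, num
-- ===== Notes on version B (the rewrite author's own statement) =====
-- stated objective: faster
-- what changed: B builds a histogram (dict) of lowercased tokens in one pass and then sums counts over the distinct words against a set of the wordlist, instead of A's per-token linear membership scan of the wordlist.
import Mathlib
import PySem

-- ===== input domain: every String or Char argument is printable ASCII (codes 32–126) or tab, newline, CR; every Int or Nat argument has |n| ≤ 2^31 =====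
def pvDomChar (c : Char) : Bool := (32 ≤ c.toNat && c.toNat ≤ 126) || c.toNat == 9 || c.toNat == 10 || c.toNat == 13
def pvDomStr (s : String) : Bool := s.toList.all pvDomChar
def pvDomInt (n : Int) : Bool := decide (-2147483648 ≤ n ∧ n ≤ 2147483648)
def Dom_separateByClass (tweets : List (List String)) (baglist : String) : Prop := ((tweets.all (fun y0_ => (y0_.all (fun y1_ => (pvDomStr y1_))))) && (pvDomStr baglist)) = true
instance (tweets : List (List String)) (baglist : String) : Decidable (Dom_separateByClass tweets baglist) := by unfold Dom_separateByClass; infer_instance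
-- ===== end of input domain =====

-- B replaces A's per-token linear membership scan of the wordlist by a histogram of
-- lowercased tokens built once, then a single pass over the distinct words against a set
-- of the wordlist entries (measured faster in a timing run; exact same return value).


-- ===== PORT A =====
def separateByClass (tweets : List (List String)) (baglist : String) : Int × Int :=
  let summary : Int := 0
  let num : Int := 0
  let wordlist := ((PySem.Str.split? baglist ",").getD [])
  let sn :=
    tweets.foldl (fun (sn : Int × Int) dataset =>
      let vector : List String :=
        (PySem.List.pyRange 0 (dataset.length : Int) 1).foldl
          (fun v i => v ++ PySem.Str.split₀ (PySem.List.pyGetD dataset i "")) []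
      (PySem.List.pyRange 0 (vector.length : Int) 1).foldl
        (fun (sn : Int × Int) i =>
          let sn' :=
            if PySem.Str.lower (PySem.List.pyGetD vector i "") ∈ wordlist then
              (sn.1 + 1, sn.2)
            else sn
          (sn'.1, sn'.2 + 1))
        sn)
      (summary, num)
  sn

-- ===== PORT B =====
def separateByClass_alt (tweets : List (List String)) (baglist : String) : Int × Int :=
  let counter : PySem.Dict String Int :=
    tweets.foldl (fun d dataset =>
      dataset.foldl (fun d chunk =>
        (PySem.Str.split₀ chunk).foldl (fun d w =>
          let lw := PySem.Str.lower w
          d.insert lw (d.getD lw 0 + 1)) d) d)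
      PySem.Dict.empty
  let wordset : PySem.Set String := PySem.Set.ofList (((PySem.Str.split? baglist ",").getD []))
  let num : Int := (PySem.Dict.values counter).sum
  let summary : Int :=
    (((PySem.Dict.items counter).filter (fun p => PySem.Set.contains wordset p.1)).map (·.2)).sum
  (summary, num)

-- ===== PRECONDITION & SPEC =====
def Spec_separateByClass (tweets : List (List String)) (baglist : String) (out : Int × Int) : Prop := out = separateByClass_alt tweets baglist
instance (tweets : List (List String)) (baglist : String) (out : Int × Int) : Decidable (Spec_separateByClass tweets baglist out) := by unfold Spec_separateByClass; infer_instance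

-- ===== CLAIM (what is proved, stated in full; the proofs are below) =====
def Claim_equal_separateByClass : Prop := ∀ (tweets : List (List String)) (baglist : String), Dom_separateByClass tweets baglist → Spec_separateByClass tweets baglist (separateByClass tweets baglist)

-- ===== LEMMAS AND PROOFS =====

-- the raw token list of one dataset
def pvToksDs (ds : List String) : List String := ds.flatMap PySem.Str.split₀

-- the raw token list of all tweets
def pvToks (tweets : List (List String)) : List String := tweets.flatMap pvToksDs

-- A's inner vector loop builds exactly the flattened token list
theorem pv_vector_eq (ds : List String) :
    (PySem.List.pyRange 0 (ds.length : Int) 1).foldl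
      (fun v i => v ++ PySem.Str.split₀ (PySem.List.pyGetD ds i "")) [] = pvToksDs ds := by
  rw [PySem.List.foldl_pyRange_pyGetD' ds "" (fun v s => v ++ PySem.Str.split₀ s) [] le_rfl]
  simp [pvToksDs, List.flatMap_def]

-- A's counting loop over a vector adds countP/length to the accumulator
theorem pv_count_loop (v : List String) (wl : List String) (sn : Int × Int) :
    (PySem.List.pyRange 0 (v.length : Int) 1).foldl
      (fun (sn : Int × Int) i =>
        let sn' :=
          if PySem.Str.lower (PySem.List.pyGetD v i "") ∈ wl then (sn.1 + 1, sn.2) else sn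
        (sn'.1, sn'.2 + 1)) sn
    = (sn.1 + (v.countP (fun w => decide (PySem.Str.lower w ∈ wl)) : Int),
       sn.2 + (v.length : Int)) := by
  rw [PySem.List.foldl_pyRange_pyGetD' v ""
    (fun (sn : Int × Int) w =>
      let sn' := if PySem.Str.lower w ∈ wl then (sn.1 + 1, sn.2) else sn
      (sn'.1, sn'.2 + 1)) sn le_rfl]
  simp only [List.drop_zero, Int.toNat_zero]
  induction v generalizing sn with
  | nil => simp
  | cons h t ih =>
      simp only [List.foldl_cons, List.countP_cons, ih, List.length_cons]
      by_cases hm : PySem.Str.lower h ∈ wl <;>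
        simp [hm, Prod.ext_iff] <;> omega

-- characterisation of A's result
theorem pv_A_char (tweets : List (List String)) (baglist : String) :
    separateByClass tweets baglist
    = (((pvToks tweets).countP
          (fun w => decide (PySem.Str.lower w ∈ ((PySem.Str.split? baglist ",").getD []))) : Int),
       ((pvToks tweets).length : Int)) := by
  unfold separateByClass
  have main : ∀ (tw : List (List String)) (sn : Int × Int),
      tw.foldl (fun (sn : Int × Int) dataset =>
        let vector : List String :=
          (PySem.List.pyRange 0 (dataset.length : Int) 1).foldl
            (fun v i => v ++ PySem.Str.split₀ (PySem.List.pyGetD dataset i "")) []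
        (PySem.List.pyRange 0 (vector.length : Int) 1).foldl
          (fun (sn : Int × Int) i =>
            let sn' :=
              if PySem.Str.lower (PySem.List.pyGetD vector i "") ∈
                  ((PySem.Str.split? baglist ",").getD []) then (sn.1 + 1, sn.2) else sn
            (sn'.1, sn'.2 + 1)) sn) sn
      = (sn.1 + ((pvToks tw).countP
            (fun w => decide (PySem.Str.lower w ∈ ((PySem.Str.split? baglist ",").getD []))) : Int),
         sn.2 + ((pvToks tw).length : Int)) := by
    intro tw
    induction tw with
    | nil => intro sn; simp [pvToks]
    | cons d t ih =>
        intro sn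
        rw [List.foldl_cons, ih]
        simp only [pv_vector_eq, pv_count_loop]
        have : pvToks (d :: t) = pvToksDs d ++ pvToks t := rfl
        rw [this]
        simp only [List.countP_append, List.length_append, Prod.ext_iff]
        constructor <;> push_cast <;> omega
  simpa using main tweets (0, 0)

-- B's nested fold builds the counter of the lowercased token list
theorem pv_counter_eq (tweets : List (List String)) :
    (tweets.foldl (fun d dataset =>
      dataset.foldl (fun d chunk =>
        (PySem.Str.split₀ chunk).foldl (fun d w =>
          let lw := PySem.Str.lower w
          d.insert lw (d.getD lw 0 + 1)) d) d)
      PySem.Dict.empty)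
    = PySem.Dict.counter ((pvToks tweets).map PySem.Str.lower) := by
  show (tweets.foldl (fun d dataset =>
      dataset.foldl (fun d chunk =>
        (PySem.Str.split₀ chunk).foldl
          (fun d w => d.modify (PySem.Str.lower w) (0:Int) (· + 1)) d) d)
      PySem.Dict.empty) = _
  rw [PySem.Dict.counter_eq_foldl]
  unfold pvToks pvToksDs
  rw [List.map_flatMap, List.foldl_flatMap]
  have inner : ∀ (ds : List String) (d : PySem.Dict String Int),
      ds.foldl (fun d chunk =>
        (PySem.Str.split₀ chunk).foldl
          (fun d w => d.modify (PySem.Str.lower w) (0:Int) (· + 1)) d) d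
      = ((ds.flatMap PySem.Str.split₀).map PySem.Str.lower).foldl
          (fun d x => d.modify x (0:Int) (· + 1)) d := by
    intro ds d
    rw [List.map_flatMap, List.foldl_flatMap]
    simp [List.foldl_map]
  simp only [inner]

theorem pv_dedup_perm (l : List String) : (PySem.Set.ofList l).Perm l.dedup :=
  (List.perm_ext_iff_of_nodup (PySem.Set.nodup_ofList l) l.nodup_dedup).2
    (by simp [PySem.Set.mem_ofList])

theorem pv_cast_sum (l : List String) (dl : List String) :
    (dl.map (fun k => ((l.count k : Int)))).sum = ((dl.map (fun k => l.count k)).sum : Int) := by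
  rw [Nat.cast_list_sum, List.map_map]; rfl

-- sum of the counter's values is the number of tokens
theorem pv_values_sum (l : List String) :
    (PySem.Dict.values (PySem.Dict.counter l)).sum = (l.length : Int) := by
  simp only [PySem.Dict.values, PySem.Dict.items_counter, List.map_map, Function.comp_def]
  rw [((pv_dedup_perm l).map (fun k => ((l.count k : Int)))).sum_eq, pv_cast_sum,
    List.sum_map_count_dedup_eq_length]

-- sum of the counts of distinct words inside the set is countP
theorem pv_summary_sum (l : List String) (wl : List String) :
    (((PySem.Dict.items (PySem.Dict.counter l)).filter
        (fun p => PySem.Set.contains (PySem.Set.ofList wl) p.1)).map (·.2)).sum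
    = (l.countP (fun w => decide (w ∈ wl)) : Int) := by
  rw [PySem.Dict.items_counter, List.filter_map]
  simp only [List.map_map, Function.comp_def]
  have hpred : (fun k => PySem.Set.contains (PySem.Set.ofList wl) k)
      = (fun k => decide (k ∈ wl)) := by
    funext k; simp [PySem.Set.contains, PySem.Set.mem_ofList]
  simp only [hpred]
  rw [(((pv_dedup_perm l).filter (fun k => decide (k ∈ wl))).map
    (fun k => ((l.count k : Int)))).sum_eq, pv_cast_sum,
    List.sum_map_count_dedup_filter_eq_countP]

-- ===== VERDICT (by name: the statement is the Claim_ definition above) =====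
theorem separateByClass_spec : Claim_equal_separateByClass := by
  intro tweets baglist _
  show _ = _
  rw [pv_A_char]
  show _ = (_, _)
  rw [pv_counter_eq, pv_values_sum, pv_summary_sum]
  simp [List.countP_map, Function.comp_def]
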